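-- pv_equiv track=rewrite | github.com/ddu0422/study | algorithm/baekjoon/greedy/silver4/25379.py | solution
-- ===== SOURCE A (Python) =====
-- from copy import deepcopy
--
-- def solution(array):
--     left1 = 0
--     right1 = len(array) - 1
--     left2 = 0
--     right2 = len(array) - 1
--     array1 = deepcopy(array)
--     array2 = deepcopy(array)
--     answer1 = 0
--     answer2 = 0
--
--     while left1 < right1:
--         while left1 < len(array1) and array1[left1] % 2 == 0:
--             left1 += 1
--
--         while right1 > 0 and array1[right1] % 2 != 0:
--             right1 -= 1
--
--         if left1 < right1:
--             array1[left1], array1[right1] = array1[right1], array1[left1]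
--             answer1 += right1 - left1
--
--
--     while left2 < right2:
--         while left2 < len(array2) and array2[left2] % 2 != 0:
--             left2 += 1
--
--         while right2 > 0 and array2[right2] % 2 == 0:
--             right2 -= 1
--
--         if left2 < right2:
--             array2[left2], array2[right2] = array2[right2], array2[left2]
--             answer2 += right2 - left2
--
--
--     return min(answer1, answer2)
-- ===== SOURCE B (Python) =====
-- def solution(array):
--     odds = 0
--     evens = 0
--     cost1 = 0
--     cost2 = 0
--     for x in array:
--         if x % 2 == 0:
--             cost1 += odds
--             evens += 1
--         else:
--             cost2 += evens
--             odds += 1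
--     return min(cost1, cost2)
-- ===== Notes on version B (the rewrite author's own statement) =====
-- stated objective: simpler
-- what changed: B replaces A's two-pointer swap simulation on two deepcopied arrays by a single left-to-right pass that counts parity inversions (odds seen before each even, evens seen before each odd) and returns the minimum of the two counts; each of A's accumulated swap-distance sums equals the corresponding inversion count.
import Mathlib
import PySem

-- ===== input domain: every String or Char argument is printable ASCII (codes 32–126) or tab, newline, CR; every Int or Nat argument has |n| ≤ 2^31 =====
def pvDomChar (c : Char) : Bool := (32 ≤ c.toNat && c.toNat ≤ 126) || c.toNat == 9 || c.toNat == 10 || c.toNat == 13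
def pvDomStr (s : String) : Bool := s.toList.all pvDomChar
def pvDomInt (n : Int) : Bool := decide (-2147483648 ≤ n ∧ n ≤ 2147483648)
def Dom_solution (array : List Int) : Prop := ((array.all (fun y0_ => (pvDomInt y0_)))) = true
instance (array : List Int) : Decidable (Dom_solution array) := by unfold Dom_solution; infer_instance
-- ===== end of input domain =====

-- B replaces A's two-pointer swap simulation (on two copies) by one linear pass counting
-- parity inversions; the minimum of the two counts equals A's minimum of the two swap-distance sums.

-- ===== PORT A =====
-- A's two while-loop passes are textually identical up to the parity condition; the port
-- parameterises the shared loop shape by the parity test `e` (pass 1: e = "% 2 == 0",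
-- pass 2: e = "% 2 != 0"), exactly as each Python loop reads with its own condition.

-- inner loop `while left < len(a) and e(a[left]): left += 1`
-- (access a[left] is guarded by left < len and left ≥ 0 at every call; pyGetD's default is never used)
def advP (e : Int → Bool) (a : List Int) (l : Int) : Int :=
  if h : l < (a.length : Int) ∧ e (PySem.List.pyGetD a l 0) = true then advP e a (l + 1) else l
termination_by ((a.length : Int) - l).toNat
decreasing_by obtain ⟨h1, -⟩ := h; omega

-- inner loop `while right > 0 and not e(a[right]): right -= 1`
def retP (e : Int → Bool) (a : List Int) (r : Int) : Int :=
  if h : 0 < r ∧ e (PySem.List.pyGetD a r 0) = false then retP e a (r - 1) else r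
termination_by r.toNat
decreasing_by obtain ⟨h1, -⟩ := h; omega

-- outer loop `while left < right: advance; retreat; if left < right: swap, ans += right-left`
-- fuel is only a totality guard; 2*len+2 is proven sufficient below (lemma passP_eq)
def passP (e : Int → Bool) (fuel : Nat) (a : List Int) (l r ans : Int) : Int :=
  match fuel with
  | 0 => ans
  | f + 1 =>
    if l < r then
      if advP e a l < retP e a r then
        passP e f
          ((a.set (advP e a l).toNat (PySem.List.pyGetD a (retP e a r) 0)).set
            (retP e a r).toNat (PySem.List.pyGetD a (advP e a l) 0))
          (advP e a l) (retP e a r) (ans + (retP e a r - advP e a l))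
      else ans
    else ans

def solution (array : List Int) : Int :=
  let n : Int := array.length
  let answer1 := passP (fun x => decide (PySem.Int.mod x 2 = 0)) (2 * array.length + 2) array 0 (n - 1) 0
  let answer2 := passP (fun x => decide (PySem.Int.mod x 2 ≠ 0)) (2 * array.length + 2) array 0 (n - 1) 0
  min answer1 answer2

-- ===== PORT B =====
def solution_alt (array : List Int) : Int :=
  let s := array.foldl
    (fun (st : Int × Int × Int × Int) x =>
      if PySem.Int.mod x 2 = 0 then (st.1, st.2.1 + 1, st.2.2.1 + st.1, st.2.2.2)
      else (st.1 + 1, st.2.1, st.2.2.1, st.2.2.2 + st.2.1))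
    (0, 0, 0, 0)
  min s.2.2.1 s.2.2.2

-- ===== PRECONDITION & SPEC =====
def Spec_solution (array : List Int) (out : Int) : Prop := out = solution_alt array
instance (array : List Int) (out : Int) : Decidable (Spec_solution array out) := by unfold Spec_solution; infer_instance

-- ===== CLAIM (what is proved, stated in full; the proofs are below) =====
def Claim_equal_solution : Prop := ∀ (array : List Int), Dom_solution array → Spec_solution array (solution array)

-- ===== LEMMAS AND PROOFS =====

-- number of elements of u satisfying e, as an Int
def cntP (e : Int → Bool) : List Int → Int
  | [] => 0
  | x :: t => (if e x then 1 else 0) + cntP e t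

-- number of "inversions": pairs i < j with ¬ e u[i] and e u[j]
def invP (e : Int → Bool) : List Int → Int
  | [] => 0
  | x :: t => (if e x then 0 else cntP e t) + invP e t

lemma cntP_append (e : Int → Bool) (u v : List Int) :
    cntP e (u ++ v) = cntP e u + cntP e v := by
  induction u with
  | nil => simp [cntP]
  | cons x t ih => simp [cntP, ih]; ring

lemma cntP_pair (e : Int → Bool) (u : List Int) :
    cntP e u + cntP (fun x => !e x) u = u.length := by
  induction u with
  | nil => simp [cntP]
  | cons x t ih => cases hx : e x <;> (simp [cntP, hx]; omega)

lemma invP_append (e : Int → Bool) (u v : List Int) :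
    invP e (u ++ v) = invP e u + invP e v + cntP (fun x => !e x) u * cntP e v := by
  induction u with
  | nil => simp [invP, cntP]
  | cons x t ih =>
    cases hx : e x <;> (simp [invP, cntP, hx, ih, cntP_append]; try ring)

lemma cntP_zero_of_all_false (e : Int → Bool) (u : List Int)
    (h : ∀ z ∈ u, e z = false) : cntP e u = 0 := by
  induction u with
  | nil => rfl
  | cons x t ih => simp [cntP, h x (by simp), ih (fun z hz => h z (by simp [hz]))]

lemma cntP_not_zero_of_all_true (e : Int → Bool) (u : List Int)
    (h : ∀ z ∈ u, e z = true) : cntP (fun x => !e x) u = 0 := by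
  induction u with
  | nil => rfl
  | cons x t ih => simp [cntP, h x (by simp), ih (fun z hz => h z (by simp [hz]))]

lemma invP_zero_of_all_true (e : Int → Bool) (u : List Int)
    (h : ∀ z ∈ u, e z = true) : invP e u = 0 := by
  induction u with
  | nil => rfl
  | cons x t ih => simp [invP, h x (by simp), ih (fun z hz => h z (by simp [hz]))]

lemma invP_zero_of_all_false (e : Int → Bool) (u : List Int)
    (h : ∀ z ∈ u, e z = false) : invP e u = 0 := by
  induction u with
  | nil => rfl
  | cons x t ih =>
    simp [invP, h x (by simp), ih (fun z hz => h z (by simp [hz])),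
      cntP_zero_of_all_false e t (fun z hz => h z (by simp [hz]))]

-- no (¬e)-before-e pair ⇒ no inversions
lemma invP_zero_of (e : Int → Bool) (a : List Int)
    (h : ∀ (i j : Nat) (hi : i < a.length) (hj : j < a.length),
        i < j → e a[i] = false → e a[j] = true → False) :
    invP e a = 0 := by
  induction a with
  | nil => rfl
  | cons x t ih =>
    have ht : invP e t = 0 := by
      apply ih
      intro i j hi hj hij hfi htj
      exact h (i + 1) (j + 1) (by simpa using hi) (by simpa using hj) (by omega)
        (by simpa using hfi) (by simpa using htj)
    cases hx : e x with
    | true => simp [invP, hx, ht]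
    | false =>
      have hc : cntP e t = 0 := by
        apply cntP_zero_of_all_false
        intro z hz
        obtain ⟨k, hk, rfl⟩ := List.getElem_of_mem hz
        cases hek : e t[k] with
        | false => rfl
        | true =>
          exact absurd (h 0 (k + 1) (by simp) (by simpa using hk) (by omega)
            (by simpa using hx) (by simpa using hek)) (by simp)
      simp [invP, hx, ht, hc]

-- the inversion count of a swap: P all-e, S all-(¬e), x not e, y e
lemma invP_swap (e : Int → Bool) (P M S : List Int) (x y : Int)
    (hP : ∀ z ∈ P, e z = true) (hS : ∀ z ∈ S, e z = false)
    (hx : e x = false) (hy : e y = true) :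
    invP e (P ++ y :: (M ++ x :: S)) = invP e (P ++ x :: (M ++ y :: S)) - ((M.length : Int) + 1) := by
  have hpair := cntP_pair e M
  simp [invP_append, invP, cntP_append, cntP, hx, hy,
    invP_zero_of_all_true e P hP, cntP_not_zero_of_all_true e P hP,
    invP_zero_of_all_false e S hS, cntP_zero_of_all_false e S hS]
  omega

-- splitting a list at two indices i < j
lemma split2 (a : List Int) (i j : Nat) (hij : i < j) (hj : j < a.length) :
    a = a.take i ++ a[i] :: ((a.drop (i + 1)).take (j - i - 1) ++ a[j] :: a.drop (j + 1)) := by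
  have hi : i < a.length := by omega
  conv_lhs => rw [← List.take_append_drop i a]
  rw [List.drop_eq_getElem_cons hi]
  congr 1
  congr 1
  conv_lhs => rw [← List.take_append_drop (j - i - 1) (a.drop (i + 1))]
  congr 1
  rw [List.drop_drop]
  have h : i + 1 + (j - i - 1) = j := by omega
  rw [h, List.drop_eq_getElem_cons hj]

lemma set_append_length (u v : List Int) (b c : Int) :
    (u ++ b :: v).set u.length c = u ++ c :: v := by
  induction u with
  | nil => simp
  | cons w t ih => simp [ih]

-- the double set realising Python's tuple swap, on the split form
lemma swap_eq (P M S : List Int) (x y : Int) :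
    ((P ++ x :: (M ++ y :: S)).set P.length y).set (P.length + M.length + 1) x
      = P ++ y :: (M ++ x :: S) := by
  rw [set_append_length]
  have h1 : P ++ y :: (M ++ y :: S) = (P ++ y :: M) ++ y :: S := by simp
  have h2 : P ++ y :: (M ++ x :: S) = (P ++ y :: M) ++ x :: S := by simp
  have hl : P.length + M.length + 1 = (P ++ y :: M).length := by
    simp [List.length_append]; omega
  rw [h1, h2, hl, set_append_length]

-- ===== specifications of the inner loops =====

lemma advP_spec (e : Int → Bool) (a : List Int) :
    ∀ (n : Nat) (l : Int), ((a.length : Int) - l).toNat ≤ n → 0 ≤ l → l ≤ (a.length : Int) →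
      l ≤ advP e a l ∧ advP e a l ≤ (a.length : Int) ∧
      (∀ (k : Nat) (hk : k < a.length), l ≤ (k : Int) → (k : Int) < advP e a l → e a[k] = true) ∧
      (advP e a l < (a.length : Int) → e (PySem.List.pyGetD a (advP e a l) 0) = false) := by
  intro n
  induction n with
  | zero =>
    intro l hn hl0 hllen
    have hl : l = (a.length : Int) := by omega
    subst hl
    rw [advP, dif_neg (by rintro ⟨h1, -⟩; omega)]
    exact ⟨le_refl _, le_refl _, fun k hk h1 h2 => by omega, fun h => absurd h (by omega)⟩
  | succ m ih =>
    intro l hn hl0 hllen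
    rw [advP]
    by_cases hc : l < (a.length : Int) ∧ e (PySem.List.pyGetD a l 0) = true
    · rw [dif_pos hc]
      obtain ⟨hlt, he⟩ := hc
      obtain ⟨ih1, ih2, ih3, ih4⟩ := ih (l + 1) (by omega) (by omega) (by omega)
      refine ⟨by omega, ih2, ?_, ih4⟩
      intro k hk hk1 hk2
      by_cases hkl : (k : Int) = l
      · have : k = l.toNat := by omega
        subst this
        rw [PySem.List.pyGetD_eq_getElem a 0 hl0 hlt] at he
        exact he
      · exact ih3 k hk (by omega) hk2
    · rw [dif_neg hc]
      refine ⟨le_refl l, hllen, ?_, ?_⟩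
      · intro k hk hk1 hk2; omega
      · intro hlt
        rcases not_and_or.mp hc with h | h
        · omega
        · simpa using h

lemma retP_spec (e : Int → Bool) (a : List Int) :
    ∀ (n : Nat) (r : Int), r.toNat ≤ n → 0 ≤ r → r < (a.length : Int) →
      0 ≤ retP e a r ∧ retP e a r ≤ r ∧
      (∀ (k : Nat) (hk : k < a.length), retP e a r < (k : Int) → (k : Int) ≤ r → e a[k] = false) ∧
      (0 < retP e a r → e (PySem.List.pyGetD a (retP e a r) 0) = true) := by
  intro n
  induction n with
  | zero =>
    intro r hn hr0 hrlen
    have hr : r = 0 := by omega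
    subst hr
    rw [retP, dif_neg (by rintro ⟨h1, -⟩; omega)]
    exact ⟨le_refl _, le_refl _, fun k hk h1 h2 => by omega, fun h => absurd h (by omega)⟩
  | succ m ih =>
    intro r hn hr0 hrlen
    rw [retP]
    by_cases hc : 0 < r ∧ e (PySem.List.pyGetD a r 0) = false
    · rw [dif_pos hc]
      obtain ⟨hpos, he⟩ := hc
      obtain ⟨ih1, ih2, ih3, ih4⟩ := ih (r - 1) (by omega) (by omega) (by omega)
      refine ⟨ih1, by omega, ?_, ih4⟩
      intro k hk hk1 hk2
      by_cases hkr : (k : Int) = r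
      · have : k = r.toNat := by omega
        subst this
        rw [PySem.List.pyGetD_eq_getElem a 0 hr0 hrlen] at he
        exact he
      · exact ih3 k hk hk1 (by omega)
    · rw [dif_neg hc]
      refine ⟨?_, le_refl r, ?_, ?_⟩
      · rcases not_and_or.mp hc with h | h
        · omega
        · exact hr0
      · intro k hk hk1 hk2; omega
      · intro hpos
        rcases not_and_or.mp hc with h | h
        · omega
        · simpa using h

-- ===== the outer loop computes the inversion count =====

lemma passP_eq (e : Int → Bool) : ∀ (fuel : Nat) (a : List Int) (l r ans : Int),
    0 ≤ l → r < (a.length : Int) →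
    (∀ (k : Nat) (hk : k < a.length), (k : Int) < l → e a[k] = true) →
    (∀ (k : Nat) (hk : k < a.length), r < (k : Int) → e a[k] = false) →
    2 * (r - l).toNat + (if e (PySem.List.pyGetD a l 0) then 0 else 1) + 1 ≤ fuel →
    passP e fuel a l r ans = ans + invP e a := by
  intro fuel
  induction fuel with
  | zero =>
    intro a l r ans hl0 hrlen Hleft Hright hfuel
    split_ifs at hfuel <;> omega
  | succ f ih =>
    intro a l r ans hl0 hrlen Hleft Hright hfuel
    rw [passP]
    by_cases hlr : l < r
    · rw [if_pos hlr]
      obtain ⟨ha1, ha2, ha3, ha4⟩ :=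
        advP_spec e a ((a.length : Int) - l).toNat l (le_refl _) hl0 (by omega)
      obtain ⟨hb1, hb2, hb3, hb4⟩ := retP_spec e a r.toNat r (le_refl _) (by omega) hrlen
      have Hleft' : ∀ (k : Nat) (hk : k < a.length), (k : Int) < advP e a l → e a[k] = true := by
        intro k hk hkl
        by_cases h : (k : Int) < l
        · exact Hleft k hk h
        · exact ha3 k hk (by omega) hkl
      have Hright' : ∀ (k : Nat) (hk : k < a.length), retP e a r < (k : Int) → e a[k] = false := by
        intro k hk hrk
        by_cases h : r < (k : Int)
        · exact Hright k hk h
        · exact hb3 k hk hrk (by omega)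
      by_cases hswap : advP e a l < retP e a r
      · rw [if_pos hswap]
        have hl'len : advP e a l < (a.length : Int) := by omega
        have hr'pos : 0 < retP e a r := by omega
        -- abbreviations for the two swap indices
        have hij : (advP e a l).toNat < (retP e a r).toNat := by omega
        have hjlen : (retP e a r).toNat < a.length := by omega
        have hilen : (advP e a l).toNat < a.length := by omega
        have hx : e a[(advP e a l).toNat] = false := by
          have := ha4 hl'len
          rwa [PySem.List.pyGetD_eq_getElem a 0 (by omega) hl'len] at this
        have hy : e a[(retP e a r).toNat] = true := by
          have := hb4 hr'pos
          rwa [PySem.List.pyGetD_eq_getElem a 0 (by omega) (by omega)] at this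
        have hget1 : PySem.List.pyGetD a (retP e a r) 0 = a[(retP e a r).toNat] :=
          PySem.List.pyGetD_eq_getElem a 0 (by omega) (by omega)
        have hget2 : PySem.List.pyGetD a (advP e a l) 0 = a[(advP e a l).toNat] :=
          PySem.List.pyGetD_eq_getElem a 0 (by omega) hl'len
        rw [hget1, hget2]
        have hsplit := split2 a (advP e a l).toNat (retP e a r).toNat hij hjlen
        have hPlen : (a.take (advP e a l).toNat).length = (advP e a l).toNat := by
          simp [List.length_take]; omega
        have hMlen :
            ((a.drop ((advP e a l).toNat + 1)).take
              ((retP e a r).toNat - (advP e a l).toNat - 1)).length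
            = (retP e a r).toNat - (advP e a l).toNat - 1 := by
          simp [List.length_take, List.length_drop]; omega
        have ha' : (a.set (advP e a l).toNat a[(retP e a r).toNat]).set (retP e a r).toNat
              a[(advP e a l).toNat]
            = a.take (advP e a l).toNat ++ a[(retP e a r).toNat] ::
              ((a.drop ((advP e a l).toNat + 1)).take
                ((retP e a r).toNat - (advP e a l).toNat - 1) ++
                a[(advP e a l).toNat] :: a.drop ((retP e a r).toNat + 1)) := by
          have h := swap_eq (a.take (advP e a l).toNat)
            ((a.drop ((advP e a l).toNat + 1)).take
              ((retP e a r).toNat - (advP e a l).toNat - 1))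
            (a.drop ((retP e a r).toNat + 1))
            a[(advP e a l).toNat] a[(retP e a r).toNat]
          rw [hPlen] at h
          have h2 : (advP e a l).toNat + (((a.drop ((advP e a l).toNat + 1)).take
              ((retP e a r).toNat - (advP e a l).toNat - 1)).length) + 1 = (retP e a r).toNat := by
            rw [hMlen]; omega
          rw [h2] at h
          rw [← hsplit] at h
          exact h
        have hlen' : ((a.set (advP e a l).toNat a[(retP e a r).toNat]).set (retP e a r).toNat
            a[(advP e a l).toNat]).length = a.length := by simp
        have hother : ∀ (k : Nat) (hk : k < a.length), k ≠ (advP e a l).toNat →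
            k ≠ (retP e a r).toNat →
            ((a.set (advP e a l).toNat a[(retP e a r).toNat]).set (retP e a r).toNat
              a[(advP e a l).toNat])[k]'(by omega) = a[k] := by
          intro k hk h1 h2
          rw [List.getElem_set_ne (by omega), List.getElem_set_ne (by omega)]
        have Hleft'' : ∀ (k : Nat)
            (hk : k < ((a.set (advP e a l).toNat a[(retP e a r).toNat]).set (retP e a r).toNat
              a[(advP e a l).toNat]).length),
            (k : Int) < advP e a l →
            e (((a.set (advP e a l).toNat a[(retP e a r).toNat]).set (retP e a r).toNat
              a[(advP e a l).toNat])[k]) = true := by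
          intro k hk hkl
          have hk' : k < a.length := by omega
          rw [hother k hk' (by omega) (by omega)]
          exact Hleft' k hk' hkl
        have Hright'' : ∀ (k : Nat)
            (hk : k < ((a.set (advP e a l).toNat a[(retP e a r).toNat]).set (retP e a r).toNat
              a[(advP e a l).toNat]).length),
            retP e a r < (k : Int) →
            e (((a.set (advP e a l).toNat a[(retP e a r).toNat]).set (retP e a r).toNat
              a[(advP e a l).toNat])[k]) = false := by
          intro k hk hrk
          have hk' : k < a.length := by omega
          rw [hother k hk' (by omega) (by omega)]
          exact Hright' k hk' hrk
        have hbonus : e (PySem.List.pyGetD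
            ((a.set (advP e a l).toNat a[(retP e a r).toNat]).set (retP e a r).toNat
              a[(advP e a l).toNat]) (advP e a l) 0) = true := by
          rw [PySem.List.pyGetD_eq_getElem _ 0 (by omega) (by rw [hlen']; omega)]
          rw [List.getElem_set_ne (by omega), List.getElem_set_self]
          exact hy
        have hfuel' : 2 * (retP e a r - advP e a l).toNat +
            (if e (PySem.List.pyGetD
              ((a.set (advP e a l).toNat a[(retP e a r).toNat]).set (retP e a r).toNat
                a[(advP e a l).toNat]) (advP e a l) 0) then 0 else 1) + 1 ≤ f := by
          rw [if_pos hbonus]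
          by_cases hstay : advP e a l = l
          · have hb1' : (if e (PySem.List.pyGetD a l 0) then 0 else 1) = 1 := by
              rw [if_neg]
              rw [← hstay, PySem.List.pyGetD_eq_getElem a 0 (by omega) (by omega)]
              simp [hx]
            rw [hb1'] at hfuel
            omega
          · have : l < advP e a l := by omega
            have hb0 : (0:Nat) ≤ (if e (PySem.List.pyGetD a l 0) then 0 else 1) := by omega
            split_ifs at hfuel <;> omega
        rw [ih _ _ _ _ (by omega) (by rw [hlen']; omega) Hleft'' Hright'' hfuel']
        -- inversion-count bookkeeping
        have hPmem : ∀ z ∈ a.take (advP e a l).toNat, e z = true := by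
          intro z hz
          obtain ⟨k, hk, rfl⟩ := List.getElem_of_mem hz
          rw [List.getElem_take]
          have hk2 : k < (advP e a l).toNat := by rw [hPlen] at hk; omega
          exact Hleft' k (by omega) (by omega)
        have hSmem : ∀ z ∈ a.drop ((retP e a r).toNat + 1), e z = false := by
          intro z hz
          obtain ⟨k, hk, rfl⟩ := List.getElem_of_mem hz
          rw [List.getElem_drop]
          have hk2 : (retP e a r).toNat + 1 + k < a.length := by
            rw [List.length_drop] at hk; omega
          exact Hright' _ hk2 (by push_cast; omega)
        have hswaps := invP_swap e (a.take (advP e a l).toNat)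
          ((a.drop ((advP e a l).toNat + 1)).take
            ((retP e a r).toNat - (advP e a l).toNat - 1))
          (a.drop ((retP e a r).toNat + 1))
          a[(advP e a l).toNat] a[(retP e a r).toNat] hPmem hSmem hx hy
        rw [← hsplit] at hswaps
        rw [ha', hswaps, hMlen]
        have : ((((retP e a r).toNat - (advP e a l).toNat - 1 : Nat)) : Int) + 1
            = retP e a r - advP e a l := by omega
        rw [this]
        ring
      · rw [if_neg hswap]
        have hz : invP e a = 0 := by
          apply invP_zero_of
          intro i j hi hj hij hfi htj
          have h1 : ¬((i : Int) < advP e a l) := by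
            intro h
            rw [Hleft' i hi h] at hfi
            cases hfi
          have h2 : ¬(retP e a r < (j : Int)) := by
            intro h
            rw [Hright' j hj h] at htj
            cases htj
          omega
        omega
    · rw [if_neg hlr]
      have hz : invP e a = 0 := by
        apply invP_zero_of
        intro i j hi hj hij hfi htj
        have h1 : ¬((i : Int) < l) := by
          intro h
          rw [Hleft i hi h] at hfi
          cases hfi
        have h2 : ¬(r < (j : Int)) := by
          intro h
          rw [Hright j hj h] at htj
          cases htj
        omega
      omega

-- ===== the fold of B computes both inversion counts =====

lemma fold_spec (xs : List Int) : ∀ (o ev c1 c2 : Int),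
    xs.foldl
      (fun (st : Int × Int × Int × Int) x =>
        if PySem.Int.mod x 2 = 0 then (st.1, st.2.1 + 1, st.2.2.1 + st.1, st.2.2.2)
        else (st.1 + 1, st.2.1, st.2.2.1, st.2.2.2 + st.2.1))
      (o, ev, c1, c2)
    = (o + cntP (fun x => !decide (PySem.Int.mod x 2 = 0)) xs,
       ev + cntP (fun x => decide (PySem.Int.mod x 2 = 0)) xs,
       c1 + o * cntP (fun x => decide (PySem.Int.mod x 2 = 0)) xs
          + invP (fun x => decide (PySem.Int.mod x 2 = 0)) xs,
       c2 + ev * cntP (fun x => !decide (PySem.Int.mod x 2 = 0)) xs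
          + invP (fun x => !decide (PySem.Int.mod x 2 = 0)) xs) := by
  induction xs with
  | nil => intro o ev c1 c2; simp [cntP, invP]
  | cons x t ih =>
    intro o ev c1 c2
    by_cases hx : PySem.Int.mod x 2 = 0
    · simp only [List.foldl_cons, ih, cntP, invP, hx, decide_true, Bool.not_true]
      simp only [Prod.mk.injEq]
      refine ⟨by simp, by simp; ring, by simp; ring, by simp; ring⟩
    · simp only [List.foldl_cons, ih, cntP, invP, hx, decide_false, Bool.not_false]
      simp only [Prod.mk.injEq]
      refine ⟨by simp; ring, by simp, by simp; ring, by simp; ring⟩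

-- ===== VERDICT (by name: the statement is the Claim_ definition above) =====
lemma pass_top (p : Int → Bool) (a : List Int) :
    passP p (2 * a.length + 2) a 0 ((a.length : Int) - 1) 0 = invP p a := by
  have hb : (if p (PySem.List.pyGetD a 0 0) then 0 else 1) ≤ 1 := by split_ifs <;> omega
  rw [passP_eq p _ a 0 _ 0 (by omega) (by omega)
    (fun k hk h => absurd h (by omega))
    (fun k hk h => absurd h (by omega))
    (by omega)]
  simp

theorem solution_spec : Claim_equal_solution := by
  intro array _
  unfold Spec_solution solution solution_alt
  have hpred : (fun x => decide (PySem.Int.mod x 2 ≠ 0))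
      = (fun x => !decide (PySem.Int.mod x 2 = 0)) := by
    funext x; rw [decide_not]
  simp only [hpred, pass_top, fold_spec array 0 0 0 0]
  simp
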